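-- pv_equiv track=rewrite | github.com/encgoo/IntroductionToAlgorithms | Introduction/Recursive/BowlingPins.py | finalWin
-- ===== SOURCE A (Python) =====
-- def finalWin(lst):
--     count = 0
--     adj = False
--     lastBin = False
--
--     for c in lst:
--         if c == 'I':
--             count += 1
--             if lastBin:
--                 adj = True
--             lastBin = True
--         else:
--             lastBin = False
--
--     if count == 1 or (count == 2 and adj):
--         return True
--     elif count == 2:
--         return False
--     else:
--         return False
-- ===== SOURCE B (Python) =====
-- def finalWin(lst):
--     mask = ''.join('I' if c == 'I' else '-' for c in lst)
--     core = mask.strip('-')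
--     return core == 'I' or core == 'II'
-- ===== Notes on version B (the rewrite author's own statement) =====
-- stated objective: alternative
-- what changed: Replaces A's stateful count/adj/lastBin scan with a pattern formulation: encode the pins as an 'I'/'-' mask string, strip the '-' padding from both ends, and win exactly when the remaining core is the literal pattern 'I' or 'II'.
import Mathlib
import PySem

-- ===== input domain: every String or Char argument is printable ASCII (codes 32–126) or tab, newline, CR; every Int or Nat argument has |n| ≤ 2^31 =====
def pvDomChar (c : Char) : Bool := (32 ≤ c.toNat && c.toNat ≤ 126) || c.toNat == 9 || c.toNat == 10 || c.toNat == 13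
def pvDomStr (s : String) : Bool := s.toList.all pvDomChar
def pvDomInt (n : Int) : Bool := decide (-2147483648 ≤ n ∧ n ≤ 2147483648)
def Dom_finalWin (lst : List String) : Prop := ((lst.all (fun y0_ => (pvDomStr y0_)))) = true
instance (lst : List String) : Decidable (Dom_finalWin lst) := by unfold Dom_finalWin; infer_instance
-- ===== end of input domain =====

-- B recasts the task as pattern matching: encode the pins as an 'I'/'-' mask, strip the
-- '-' padding from both ends, and win exactly when the core is "I" or "II" (objective: alternative).

-- ===== PORT A =====
-- state: (count, adj, lastBin)
def finalWin (lst : List String) : Bool :=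
  let st := lst.foldl
    (fun (st : Int × Bool × Bool) c =>
      if c == "I" then (st.1 + 1, (if st.2.2 then true else st.2.1), true)
      else (st.1, st.2.1, false))
    (0, false, false)
  if st.1 == 1 || (st.1 == 2 && st.2.1) then true
  else if st.1 == 2 then false
  else false

-- ===== PORT B =====
-- ''.join(...) is modelled as the List Char of the mask; str.strip('-') has no PySem
-- primitive, so it is ported by hand as dropWhile (== '-') from both ends (exact:
-- Python's strip(chars) removes exactly the leading and trailing characters in chars).
def finalWin_alt (lst : List String) : Bool :=
  let mask := lst.map (fun c => if c == "I" then 'I' else '-')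
  let core := ((mask.dropWhile (· == '-')).reverse.dropWhile (· == '-')).reverse
  core == ['I'] || core == ['I', 'I']

-- ===== PRECONDITION & SPEC =====
def Spec_finalWin (lst : List String) (out : Bool) : Prop := out = finalWin_alt lst
instance (lst : List String) (out : Bool) : Decidable (Spec_finalWin lst out) := by unfold Spec_finalWin; infer_instance

-- ===== CLAIM (what is proved, stated in full; the proofs are below) =====
def Claim_equal_finalWin : Prop := ∀ (lst : List String), Dom_finalWin lst → Spec_finalWin lst (finalWin lst)

-- ===== LEMMAS AND PROOFS =====

-- number of "I" entries
def pvCountI : List String → Nat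
  | [] => 0
  | x :: xs => (if x == "I" then 1 else 0) + pvCountI xs

-- A's adjacency flag: lb = "previous element was I"
def pvAdjI : Bool → List String → Bool
  | _, [] => false
  | lb, x :: xs => if x == "I" then (lb || pvAdjI true xs) else pvAdjI false xs

-- the mask B builds
def pvMask (lst : List String) : List Char :=
  lst.map (fun c => if c == "I" then 'I' else '-')

-- strip of trailing '-'
def pvRStrip (l : List Char) : List Char :=
  (l.reverse.dropWhile (· == '-')).reverse

theorem pvRStrip_nil : pvRStrip [] = [] := rfl

theorem pvRStrip_cons (a : Char) (l : List Char) :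
    pvRStrip (a :: l)
      = if pvRStrip l = [] then (if a == '-' then [] else [a]) else a :: pvRStrip l := by
  unfold pvRStrip
  rw [List.reverse_cons, List.dropWhile_append]
  by_cases h : (l.reverse.dropWhile (· == '-')) = []
  · simp only [h, List.isEmpty_nil, if_true, List.reverse_nil, List.reverse_eq_nil_iff.2 rfl]
    by_cases ha : a == '-' <;> simp [List.dropWhile, ha]
  · have : (l.reverse.dropWhile (· == '-')).isEmpty = false := by
      simpa [List.isEmpty_iff] using h
    rw [this]
    simp only [Bool.false_eq_true, if_false, List.reverse_append, List.reverse_cons,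
      List.reverse_nil, List.nil_append, List.singleton_append]
    have hne : ¬ ((l.reverse.dropWhile (· == '-')).reverse = []) := by
      simpa [List.reverse_eq_nil_iff] using h
    rw [if_neg hne]

-- fold-state lemmas from A's scan ------------------------------------------------

theorem pvFold_eq (lst : List String) (c : Int) (a lb : Bool) :
    lst.foldl
      (fun (st : Int × Bool × Bool) c =>
        if c == "I" then (st.1 + 1, (if st.2.2 then true else st.2.1), true)
        else (st.1, st.2.1, false))
      (c, a, lb)
    = (c + pvCountI lst, a || pvAdjI lb lst,
        lst.foldl (fun lb x => x == "I") lb) := by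
  induction lst generalizing c a lb with
  | nil => simp [pvCountI, pvAdjI]
  | cons x xs ih =>
    by_cases h : x == "I"
    · simp only [List.foldl_cons, h, if_true, ih, pvCountI, pvAdjI, Prod.mk.injEq]
      refine ⟨by push_cast; omega, ?_, trivial⟩
      cases lb <;> cases a <;> simp
    · simp only [List.foldl_cons, h, Bool.false_eq_true, if_false, ih, pvCountI, pvAdjI,
        Prod.mk.injEq]
      exact ⟨by push_cast; omega, trivial⟩

theorem pvAdj_zero (lst : List String) (lb : Bool) (h : pvCountI lst = 0) :
    pvAdjI lb lst = false := by
  induction lst generalizing lb with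
  | nil => rfl
  | cons x xs ih =>
    unfold pvCountI at h
    by_cases hx : x == "I"
    · simp [hx] at h
    · simp only [pvAdjI, hx, Bool.false_eq_true, if_false]
      exact ih false (by omega)

theorem pvAdj_false_le1 (lst : List String) (h : pvCountI lst ≤ 1) :
    pvAdjI false lst = false := by
  induction lst with
  | nil => rfl
  | cons x xs ih =>
    unfold pvCountI at h
    by_cases hx : x == "I"
    · simp only [pvAdjI, hx, if_true, Bool.false_or]
      exact pvAdj_zero xs true (by simp [hx] at h; omega)
    · simp only [pvAdjI, hx, Bool.false_eq_true, if_false]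
      exact ih (by omega)

-- B-side structure lemmas --------------------------------------------------------

theorem pvRStrip_mask_nil (xs : List String) :
    (pvRStrip (pvMask xs) = []) ↔ pvCountI xs = 0 := by
  induction xs with
  | nil => simp [pvMask, pvRStrip_nil, pvCountI]
  | cons x xs ih =>
    unfold pvMask pvCountI
    rw [List.map_cons]
    rw [show (xs.map (fun c => if c == "I" then 'I' else '-')) = pvMask xs from rfl]
    rw [pvRStrip_cons]
    by_cases h : pvRStrip (pvMask xs) = []
    · rw [if_pos h]
      by_cases hx : x == "I" <;> simp [hx, ih.1 h]
    · rw [if_neg h]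
      have : pvCountI xs ≠ 0 := fun hc => h (ih.2 hc)
      by_cases hx : x == "I" <;> simp [hx] <;> omega

theorem pvMask_cons (x : String) (xs : List String) :
    pvMask (x :: xs) = (if x == "I" then 'I' else '-') :: pvMask xs := rfl

theorem pvRStrip_mask_singleI (xs : List String) :
    (pvRStrip (pvMask xs) == ['I']) = (pvCountI xs == 1 && pvAdjI true xs) := by
  induction xs with
  | nil => simp [pvMask, pvRStrip_nil, pvCountI, pvAdjI]
  | cons x xs ih =>
    rw [pvMask_cons, pvRStrip_cons]
    by_cases hx : x == "I"
    · simp only [hx, if_true]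
      by_cases h : pvRStrip (pvMask xs) = []
      · have hc := (pvRStrip_mask_nil xs).1 h
        rw [if_pos h]
        simp [pvCountI, pvAdjI, hx, hc]
      · rw [if_neg h]
        have hc : pvCountI xs ≠ 0 := fun hc => h ((pvRStrip_mask_nil xs).2 hc)
        have h1 : ('I' :: pvRStrip (pvMask xs) == ['I']) = false := by simp [h]
        rw [h1]
        have h2 : (pvCountI (x :: xs) == 1) = false := by
          simp [pvCountI, hx]; omega
        simp [h2]
    · simp only [hx, Bool.false_eq_true, if_false]
      by_cases h : pvRStrip (pvMask xs) = []
      · have hc := (pvRStrip_mask_nil xs).1 h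
        rw [if_pos h]
        simp [pvCountI, pvAdjI, hx, hc]
      · rw [if_neg h]
        have h1 : ('-' :: pvRStrip (pvMask xs) == ['I']) = false := by simp
        rw [h1]
        by_cases h2 : pvCountI xs = 1
        · simp [pvCountI, pvAdjI, hx, h2, pvAdj_false_le1 xs (by omega)]
        · have h3 : (pvCountI xs == 1) = false := by simp [h2]
          simp [pvCountI, pvAdjI, hx, h3]

-- B's result written with the named helpers
theorem pvAlt_def (lst : List String) :
    finalWin_alt lst
      = ((pvRStrip ((pvMask lst).dropWhile (· == '-')) == ['I'])
        || (pvRStrip ((pvMask lst).dropWhile (· == '-')) == ['I', 'I'])) := rfl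

-- B in terms of count / adj
theorem pvAlt_eq (lst : List String) :
    finalWin_alt lst
      = ((pvCountI lst == 1) || ((pvCountI lst == 2) && pvAdjI false lst)) := by
  induction lst with
  | nil => rfl
  | cons x xs ih =>
    rw [pvAlt_def, pvMask_cons]
    by_cases hx : x == "I"
    · simp only [hx, if_true, List.dropWhile_cons]
      rw [show (('I' : Char) == '-') = false from rfl]
      simp only [Bool.false_eq_true, if_false]
      rw [pvRStrip_cons]
      by_cases h : pvRStrip (pvMask xs) = []
      · have hc := (pvRStrip_mask_nil xs).1 h
        rw [if_pos h]
        simp [pvCountI, pvAdjI, hx, hc]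
      · rw [if_neg h]
        have hc : pvCountI xs ≠ 0 := fun hc => h ((pvRStrip_mask_nil xs).2 hc)
        have h1 : ('I' :: pvRStrip (pvMask xs) == ['I']) = false := by simp [h]
        have h2 : ('I' :: pvRStrip (pvMask xs) == ['I', 'I'])
            = (pvRStrip (pvMask xs) == ['I']) := by simp
        rw [h1, h2, pvRStrip_mask_singleI]
        have hn1 : (pvCountI (x :: xs) == 1) = false := by
          simp [pvCountI, hx]; omega
        have hn2 : (pvCountI (x :: xs) == 2) = (pvCountI xs == 1) := by
          by_cases h1 : pvCountI xs = 1 <;> simp [pvCountI, hx, h1] <;> omega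
        rw [hn1, hn2]
        simp [pvAdjI, hx]
    · simp only [hx, Bool.false_eq_true, if_false, List.dropWhile_cons]
      rw [show (('-' : Char) == '-') = true from rfl]
      simp only [if_true]
      rw [← pvAlt_def, ih]
      simp [pvCountI, pvAdjI, hx]

-- ===== VERDICT (by name: the statement is the Claim_ definition above) =====
theorem finalWin_spec : Claim_equal_finalWin := by
  intro lst _
  unfold Spec_finalWin
  have hA : finalWin lst
      = (((pvCountI lst : Int) == 1) || (((pvCountI lst : Int) == 2) && pvAdjI false lst)) := by
    unfold finalWin
    rw [pvFold_eq]
    simp only [Int.zero_add, Bool.false_or]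
    cases hb : (((pvCountI lst : Int) == 1) || ((pvCountI lst : Int) == 2) && pvAdjI false lst) <;>
      simp
  rw [hA, pvAlt_eq]
  have e1 : ((pvCountI lst : Int) == 1) = (pvCountI lst == 1) := by
    by_cases h : pvCountI lst = 1 <;> simp [h] <;> omega
  have e2 : ((pvCountI lst : Int) == 2) = (pvCountI lst == 2) := by
    by_cases h : pvCountI lst = 2 <;> simp [h] <;> omega
  rw [e1, e2]
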